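-- pv_equiv track=rewrite | github.com/ranpariyachetan/leetcode_solutions | easy/3637/solution_2.py | isTrionic
-- ===== SOURCE A (Python) =====
-- from typing import List
--
-- def isTrionic(nums: List[int]):
--     n = len(nums)
--
--     p = 0
--     v = 0
--     i = 1
--     while i < n and nums[i] > nums[i - 1]:
--         i += 1
--     p = i - 1
--
--     i = n - 1
--     while i > 0 and nums[i] > nums[i - 1]:
--         i -= 1
--     v = i
--
--     if p < v and p != 0 and v != n - 1:
--         for i in range(p, v):
--             if nums[i] <= nums[i + 1]:
--                 return False
--         return True
--
--     return False
-- ===== SOURCE B (Python) =====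
-- from typing import List
--
-- def isTrionic(nums: List[int]):
--     # Single forward pass DFA over consecutive steps:
--     # state 0 = nothing consumed, 1 = in first up-run, 2 = in down-run, 3 = in final up-run.
--     state = 0
--     for prev, cur in zip(nums, nums[1:]):
--         if cur > prev:
--             if state == 0 or state == 2:
--                 state += 1
--         elif cur < prev:
--             if state == 1 or state == 2:
--                 state = 2
--             else:
--                 return False
--         else:
--             return False
--     return state == 3
-- ===== Notes on version B (the rewrite author's own statement) =====
-- stated objective: alternative
-- what changed: Replaced A's three separate index scans (forward up-run, backward up-run, middle strict-decrease check) with one forward pass driving a 4-state machine over consecutive differences.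
import Mathlib
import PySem

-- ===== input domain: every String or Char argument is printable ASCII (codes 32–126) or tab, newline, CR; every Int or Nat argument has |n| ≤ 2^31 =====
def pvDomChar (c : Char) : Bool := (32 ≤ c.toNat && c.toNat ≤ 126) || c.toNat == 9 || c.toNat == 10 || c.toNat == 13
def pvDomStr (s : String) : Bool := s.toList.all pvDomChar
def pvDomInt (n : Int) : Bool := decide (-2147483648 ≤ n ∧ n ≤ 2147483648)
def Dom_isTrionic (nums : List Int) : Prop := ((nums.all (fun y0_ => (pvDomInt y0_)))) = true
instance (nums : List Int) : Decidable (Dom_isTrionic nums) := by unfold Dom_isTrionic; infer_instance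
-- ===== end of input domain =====

-- B replaces A's three index scans with one forward pass over consecutive differences
-- driving a four-state machine; same O(n) cost, no speed claim.

-- ===== PORT A =====
-- First while loop: advance i while i < n and nums[i] > nums[i-1].
-- All accesses are in range (1 ≤ i < n inside the loop), so getElem! is exact here.
def upFrom (nums : List Int) (i : Nat) : Nat :=
  if h : i < nums.length ∧ nums[i-1]! < nums[i]! then upFrom nums (i+1) else i
termination_by nums.length - i
decreasing_by omega

-- Second while loop: decrease i while i > 0 and nums[i] > nums[i-1].
def downTo (nums : List Int) (i : Nat) : Nat :=
  if h : 0 < i ∧ nums[i-1]! < nums[i]! then downTo nums (i-1) else i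
termination_by i
decreasing_by omega

-- The for-loop over range(p, v): return False on nums[i] <= nums[i+1], else True.
def strictDec (nums : List Int) (i v : Nat) : Bool :=
  if h : i < v then
    if nums[i]! ≤ nums[i+1]! then false else strictDec nums (i+1) v
  else true
termination_by v - i
decreasing_by omega

-- Note: Python's `i = n - 1` is -1 for n = 0; there the second while loop does not run,
-- v = -1 and the final condition is False; with Nat truncation v = 0 and p = 0, so the
-- final condition `p < v` is equally False: the port returns False exactly like A.
def isTrionic (nums : List Int) : Bool :=
  let n := nums.length
  let p := upFrom nums 1 - 1
  let v := downTo nums (n - 1)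
  if p < v ∧ p ≠ 0 ∧ v ≠ n - 1 then strictDec nums p v else false

-- ===== PORT B =====
-- Source B's loop over zip(nums, nums[1:]) with the running `state`, head of the list = prev.
def goB (state : Nat) : List Int → Bool
  | prev :: cur :: rest =>
    if prev < cur then
      goB (if state = 0 ∨ state = 2 then state + 1 else state) (cur :: rest)
    else if cur < prev then
      if state = 1 ∨ state = 2 then goB 2 (cur :: rest) else false
    else false
  | _ => state == 3

def isTrionic_alt (nums : List Int) : Bool := goB 0 nums

-- ===== PRECONDITION & SPEC =====
def Spec_isTrionic (nums : List Int) (out : Bool) : Prop := out = isTrionic_alt nums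
instance (nums : List Int) (out : Bool) : Decidable (Spec_isTrionic nums out) := by unfold Spec_isTrionic; infer_instance

-- ===== CLAIM (what is proved, stated in full; the proofs are below) =====
def Claim_equal_isTrionic : Prop := ∀ (nums : List Int), Dom_isTrionic nums → Spec_isTrionic nums (isTrionic nums)

-- ===== LEMMAS AND PROOFS =====

-- length of the maximal strictly increasing run of steps at the head of l
def upLen : List Int → Nat
  | a :: b :: t => if a < b then upLen (b :: t) + 1 else 0
  | _ => 0

-- length of the maximal strictly decreasing run of steps at the head of l
def dnLen : List Int → Nat
  | a :: b :: t => if b < a then dnLen (b :: t) + 1 else 0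
  | _ => 0

theorem upLen_lt : (l : List Int) → l ≠ [] → upLen l < l.length
  | [_], _ => by simp [upLen]
  | a :: b :: t, _ => by
    have ih := upLen_lt (b :: t) (by simp)
    simp only [upLen, List.length_cons] at *
    split <;> omega

theorem upLen_up : (l : List Int) → ∀ k, k < upLen l → l[k]! < l[k+1]!
  | a :: b :: t, k, hk => by
    simp only [upLen] at hk
    split at hk
    · match k with
      | 0 => simpa using ‹a < b›
      | k + 1 =>
        have ih := upLen_up (b :: t) k (by omega)
        simpa using ih
    · omega

theorem upLen_stop : (l : List Int) → upLen l + 1 < l.length →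
    ¬ l[upLen l]! < l[upLen l + 1]!
  | a :: b :: t, h => by
    by_cases hab : a < b
    · have h' : upLen (b :: t) + 1 < (b :: t).length := by
        simp only [upLen, if_pos hab, List.length_cons] at h ⊢; omega
      have ih := upLen_stop (b :: t) h'
      simp only [upLen, if_pos hab]
      simpa using ih
    · simp only [upLen, if_neg hab]
      simpa using hab

theorem dnLen_lt : (l : List Int) → l ≠ [] → dnLen l < l.length
  | [_], _ => by simp [dnLen]
  | a :: b :: t, _ => by
    have ih := dnLen_lt (b :: t) (by simp)
    simp only [dnLen, List.length_cons] at *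
    split <;> omega

theorem dnLen_dn : (l : List Int) → ∀ k, k < dnLen l → l[k+1]! < l[k]!
  | a :: b :: t, k, hk => by
    simp only [dnLen] at hk
    split at hk
    · match k with
      | 0 => simpa using ‹b < a›
      | k + 1 =>
        have ih := dnLen_dn (b :: t) k (by omega)
        simpa using ih
    · omega

theorem dnLen_stop : (l : List Int) → dnLen l + 1 < l.length →
    ¬ l[dnLen l + 1]! < l[dnLen l]!
  | a :: b :: t, h => by
    by_cases hba : b < a
    · have h' : dnLen (b :: t) + 1 < (b :: t).length := by
        simp only [dnLen, if_pos hba, List.length_cons] at h ⊢; omega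
      have ih := dnLen_stop (b :: t) h'
      simp only [dnLen, if_pos hba]
      simpa using ih
    · simp only [dnLen, if_neg hba]
      simpa using hba

theorem goB_step_up (st : Nat) (a b : Int) (t : List Int) (h : a < b) :
    goB st (a :: b :: t) = goB (if st = 0 ∨ st = 2 then st + 1 else st) (b :: t) := by
  simp only [goB, if_pos h]

theorem goB_step_dn (st : Nat) (a b : Int) (t : List Int) (h : b < a) :
    goB st (a :: b :: t) = if st = 1 ∨ st = 2 then goB 2 (b :: t) else false := by
  simp only [goB, if_neg (by omega : ¬ a < b), if_pos h]

theorem goB_step_eq (st : Nat) (a b : Int) (t : List Int) (h1 : ¬ a < b) (h2 : ¬ b < a) :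
    goB st (a :: b :: t) = false := by
  simp only [goB, if_neg h1, if_neg h2]

theorem goB3 : (x : Int) → (t : List Int) →
    goB 3 (x :: t) = decide (upLen (x :: t) = t.length)
  | x, [] => by simp [goB, upLen]
  | a, b :: t => by
    by_cases hab : a < b
    · have ih := goB3 b t
      have hu : upLen (a :: b :: t) = upLen (b :: t) + 1 := by simp [upLen, hab]
      rw [goB_step_up 3 a b t hab]
      show goB 3 (b :: t) = _
      rw [ih, hu]
      exact decide_eq_decide.mpr (by simp)
    · have hu : upLen (a :: b :: t) = 0 := by simp [upLen, hab]
      rw [hu]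
      by_cases hba : b < a
      · rw [goB_step_dn 3 a b t hba]
        show false = _
        simp
      · rw [goB_step_eq 3 a b t hab hba]
        simp

theorem goB2 : (x : Int) → (t : List Int) →
    goB 2 (x :: t) =
      decide (1 ≤ upLen ((x :: t).drop (dnLen (x :: t))) ∧
        upLen ((x :: t).drop (dnLen (x :: t))) + 1 = ((x :: t).drop (dnLen (x :: t))).length)
  | x, [] => by simp [goB, dnLen, upLen]
  | a, b :: t => by
    by_cases hab : a < b
    · have hnb : ¬ b < a := by omega
      have h3 := goB3 b t
      have h1 : upLen (b :: t) < (b :: t).length := upLen_lt _ (by simp)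
      have hd : dnLen (a :: b :: t) = 0 := by simp [dnLen, hnb]
      have hu : upLen (a :: b :: t) = upLen (b :: t) + 1 := by simp [upLen, hab]
      rw [goB_step_up 2 a b t hab]
      show goB 3 (b :: t) = _
      rw [h3, hd, List.drop_zero, hu]
      simp only [List.length_cons] at h1 ⊢
      exact decide_eq_decide.mpr (by omega)
    · by_cases hba : b < a
      · have ih := goB2 b t
        have hd : dnLen (a :: b :: t) = dnLen (b :: t) + 1 := by simp [dnLen, hba]
        rw [goB_step_dn 2 a b t hba]
        show goB 2 (b :: t) = _
        rw [ih, hd, List.drop_succ_cons]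
      · have hd : dnLen (a :: b :: t) = 0 := by simp [dnLen, hba]
        have hu : upLen (a :: b :: t) = 0 := by simp [upLen, hab]
        rw [goB_step_eq 2 a b t hab hba, hd, List.drop_zero, hu]
        simp

theorem goB1 : (x : Int) → (t : List Int) →
    goB 1 (x :: t) =
      decide (1 ≤ dnLen ((x :: t).drop (upLen (x :: t))) ∧
        1 ≤ upLen (((x :: t).drop (upLen (x :: t))).drop (dnLen ((x :: t).drop (upLen (x :: t))))) ∧
        upLen (((x :: t).drop (upLen (x :: t))).drop (dnLen ((x :: t).drop (upLen (x :: t))))) + 1 =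
          (((x :: t).drop (upLen (x :: t))).drop (dnLen ((x :: t).drop (upLen (x :: t))))).length)
  | x, [] => by simp [goB, upLen, dnLen]
  | a, b :: t => by
    by_cases hab : a < b
    · have ih := goB1 b t
      have hu : upLen (a :: b :: t) = upLen (b :: t) + 1 := by simp [upLen, hab]
      rw [goB_step_up 1 a b t hab]
      show goB 1 (b :: t) = _
      rw [ih, hu, List.drop_succ_cons]
    · by_cases hba : b < a
      · have h2 := goB2 b t
        have hu : upLen (a :: b :: t) = 0 := by simp [upLen, hab]
        have hd : dnLen (a :: b :: t) = dnLen (b :: t) + 1 := by simp [dnLen, hba]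
        rw [goB_step_dn 1 a b t hba]
        show goB 2 (b :: t) = _
        rw [h2]
        simp only [hu, List.drop_zero, hd, List.drop_succ_cons]
        exact decide_eq_decide.mpr (by
          constructor
          · rintro ⟨h1, h2'⟩; exact ⟨by omega, h1, h2'⟩
          · rintro ⟨_, h1, h2'⟩; exact ⟨h1, h2'⟩)
      · have hu : upLen (a :: b :: t) = 0 := by simp [upLen, hab]
        have hd : dnLen (a :: b :: t) = 0 := by simp [dnLen, hba]
        rw [goB_step_eq 1 a b t hab hba, hu, List.drop_zero, hd, List.drop_zero]
        simp

theorem alt_char : (nums : List Int) →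
    isTrionic_alt nums =
      decide (1 ≤ upLen nums ∧ 1 ≤ dnLen (nums.drop (upLen nums)) ∧
        1 ≤ upLen ((nums.drop (upLen nums)).drop (dnLen (nums.drop (upLen nums)))) ∧
        upLen ((nums.drop (upLen nums)).drop (dnLen (nums.drop (upLen nums)))) + 1 =
          ((nums.drop (upLen nums)).drop (dnLen (nums.drop (upLen nums)))).length)
  | [] => by simp [isTrionic_alt, goB, upLen, dnLen]
  | [x] => by simp [isTrionic_alt, goB, upLen, dnLen]
  | a :: b :: t => by
    by_cases hab : a < b
    · have ih := goB1 b t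
      have hu : upLen (a :: b :: t) = upLen (b :: t) + 1 := by simp [upLen, hab]
      show goB 0 (a :: b :: t) = _
      rw [goB_step_up 0 a b t hab]
      show goB 1 (b :: t) = _
      rw [ih, hu, List.drop_succ_cons]
      exact decide_eq_decide.mpr (by
        constructor
        · rintro ⟨h1, h2', h3'⟩; exact ⟨by omega, h1, h2', h3'⟩
        · rintro ⟨_, h1, h2', h3'⟩; exact ⟨h1, h2', h3'⟩)
    · by_cases hba : b < a
      · have hu : upLen (a :: b :: t) = 0 := by simp [upLen, hab]
        show goB 0 (a :: b :: t) = _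
        rw [goB_step_dn 0 a b t hba, hu]
        show false = _
        simp
      · have hu : upLen (a :: b :: t) = 0 := by simp [upLen, hab]
        show goB 0 (a :: b :: t) = _
        rw [goB_step_eq 0 a b t hab hba, hu]
        simp

-- index translation for drops
theorem drop_getElem! (l : List Int) (j k : Nat) (h : j + k < l.length) :
    (l.drop j)[k]! = l[j+k]! := by
  rw [getElem!_pos (l.drop j) k (by simp; omega), getElem!_pos l (j+k) h, List.getElem_drop]

theorem upLen_short (l : List Int) (h : l.length ≤ 1) : upLen l = 0 := by
  match l with
  | [] => simp [upLen]
  | [x] => simp [upLen]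
  | a :: b :: t => simp at h

theorem upFrom_eq (nums : List Int) (i : Nat) (hi : 1 ≤ i) :
    upFrom nums i = i + upLen (nums.drop (i-1)) := by
  rw [upFrom]
  by_cases h : i < nums.length ∧ nums[i-1]! < nums[i]!
  · rw [dif_pos h]
    have ih := upFrom_eq nums (i+1) (by omega)
    have h1 : i - 1 < nums.length := by omega
    have e1 : nums.drop (i-1) = nums[i-1] :: nums.drop (i-1+1) :=
      List.drop_eq_getElem_cons h1
    have e2 : nums.drop i = nums[i] :: nums.drop (i+1) :=
      List.drop_eq_getElem_cons h.1
    have e3 : i - 1 + 1 = i := by omega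
    have hlt : nums[i-1]'h1 < nums[i]'h.1 := by
      have := h.2
      rwa [getElem!_pos nums (i-1) h1, getElem!_pos nums i h.1] at this
    rw [ih, e1, e3, e2]
    simp only [upLen, if_pos hlt]
    rw [← e2]
    have e4 : nums.drop (i+1-1) = nums.drop i := by congr 1
    rw [e4]
    omega
  · rw [dif_neg h]
    by_cases hl : i < nums.length
    · have hnlt : ¬ nums[i-1]! < nums[i]! := fun hc => h ⟨hl, hc⟩
      have h1 : i - 1 < nums.length := by omega
      have e1 : nums.drop (i-1) = nums[i-1] :: nums.drop (i-1+1) :=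
        List.drop_eq_getElem_cons h1
      have e2 : nums.drop i = nums[i] :: nums.drop (i+1) :=
        List.drop_eq_getElem_cons hl
      have e3 : i - 1 + 1 = i := by omega
      have hlt : ¬ nums[i-1]'h1 < nums[i]'hl := by
        rwa [getElem!_pos nums (i-1) h1, getElem!_pos nums i hl] at hnlt
      rw [e1, e3, e2]
      simp only [upLen, if_neg hlt]
      omega
    · have hshort : (nums.drop (i-1)).length ≤ 1 := by
        simp only [List.length_drop]; omega
      rw [upLen_short _ hshort]
      omega
termination_by nums.length - i
decreasing_by omega

theorem downTo_le (nums : List Int) (i : Nat) : downTo nums i ≤ i := by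
  induction i using Nat.strong_induction_on with
  | _ i ih =>
    rw [downTo]
    split
    · rename_i h
      have := ih (i-1) (by omega)
      omega
    · omega

theorem downTo_up (nums : List Int) (i : Nat) :
    ∀ k, downTo nums i ≤ k → k < i → nums[k]! < nums[k+1]! := by
  induction i using Nat.strong_induction_on with
  | _ i ih =>
    rw [downTo]
    split
    · rename_i h
      intro k h1 h2
      rcases Nat.lt_or_ge k (i-1) with hk | hk
      · exact ih (i-1) (by omega) k h1 hk
      · have hk1 : k = i - 1 := by omega
        have hk2 : k + 1 = i := by omega
        rw [hk2, hk1]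
        exact h.2
    · intro k h1 h2
      omega

theorem downTo_stop (nums : List Int) (i : Nat) :
    0 < downTo nums i → ¬ nums[downTo nums i - 1]! < nums[downTo nums i]! := by
  induction i using Nat.strong_induction_on with
  | _ i ih =>
    rw [downTo]
    split
    · rename_i h
      exact ih (i-1) (by omega)
    · rename_i h
      intro h0
      exact fun hc => h ⟨h0, hc⟩

theorem strictDec_iff (nums : List Int) (v i : Nat) :
    strictDec nums i v = true ↔ ∀ k, i ≤ k → k < v → ¬ nums[k]! ≤ nums[k+1]! := by
  rw [strictDec]
  split
  · rename_i hiv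
    split
    · rename_i hle
      simp only [Bool.false_eq_true, false_iff]
      intro hall
      exact hall i le_rfl hiv hle
    · rename_i hnle
      rw [strictDec_iff nums v (i+1)]
      constructor
      · intro hall k h1 h2
        rcases Nat.eq_or_lt_of_le h1 with rfl | hk
        · exact hnle
        · exact hall k (by omega) h2
      · intro hall k h1 h2
        exact hall k (by omega) h2
  · rename_i hiv
    constructor
    · intro _ k h1 h2
      omega
    · intro _
      rfl
termination_by v - i
decreasing_by omega

-- ===== VERDICT (by name: the statement is the Claim_ definition above) =====
theorem isTrionic_spec : Claim_equal_isTrionic := by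
  intro nums _
  unfold Spec_isTrionic
  rw [alt_char]
  have hp : upFrom nums 1 - 1 = upLen nums := by
    have h := upFrom_eq nums 1 le_rfl
    simp only [Nat.sub_self, List.drop_zero] at h
    omega
  simp only [isTrionic]
  rw [hp]
  set n := nums.length with hn
  set v := downTo nums (n - 1) with hv
  set a := upLen nums with ha
  set l1 := nums.drop a with hl1
  set b := dnLen l1 with hb
  set l2 := l1.drop b with hl2
  set c := upLen l2 with hc
  have hl1len : l1.length = n - a := by rw [hl1, List.length_drop, hn]
  have hl2len : l2.length = n - a - b := by rw [hl2, hl1, List.length_drop, List.length_drop, hn]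
  -- step facts about nums derived from upLen / dnLen on the drops
  have F1 : ∀ k, k < a → nums[k]! < nums[k+1]! := fun k hk => upLen_up nums k hk
  have F2 : a + 1 < n → ¬ nums[a]! < nums[a+1]! := fun h => upLen_stop nums h
  have halt : nums ≠ [] → a < n := fun h => upLen_lt nums h
  have F3 : ∀ k, k < b → nums[a+k+1]! < nums[a+k]! := by
    intro k hk
    have hne : l1 ≠ [] := by
      intro e
      rw [e] at hb
      simp [dnLen] at hb
      omega
    have hblt : b < l1.length := dnLen_lt l1 hne
    have hfact := dnLen_dn l1 k hk
    rw [hl1, drop_getElem! nums a (k+1) (by omega), drop_getElem! nums a k (by omega)] at hfact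
    exact hfact
  have F4 : b + 1 < l1.length → ¬ nums[a+b+1]! < nums[a+b]! := by
    intro h hc'
    have hfact := dnLen_stop l1 h
    rw [hl1, drop_getElem! nums a (b+1) (by omega), drop_getElem! nums a b (by omega)] at hfact
    exact hfact hc'
  have F6 : ∀ k, k < c → nums[a+b+k]! < nums[a+b+k+1]! := by
    intro k hk
    have hne : l2 ≠ [] := by
      intro e
      rw [e] at hc
      simp [upLen] at hc
      omega
    have hclt : c < l2.length := upLen_lt l2 hne
    have hfact := upLen_up l2 k hk
    rw [hl2, drop_getElem! l1 b k (by omega), drop_getElem! l1 b (k+1) (by omega),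
      hl1, drop_getElem! nums a (b+k) (by omega), drop_getElem! nums a (b+(k+1)) (by omega)] at hfact
    have e1 : a + (b + k) = a + b + k := by omega
    have e2 : a + (b + (k+1)) = a + b + k + 1 := by omega
    rw [e1, e2] at hfact
    exact hfact
  have F7 : c + 1 < l2.length → ¬ nums[a+b+c]! < nums[a+b+c+1]! := by
    intro h hc'
    have hfact := upLen_stop l2 h
    rw [hl2, drop_getElem! l1 b c (by omega), drop_getElem! l1 b (c+1) (by omega),
      hl1, drop_getElem! nums a (b+c) (by omega), drop_getElem! nums a (b+(c+1)) (by omega)] at hfact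
    have e1 : a + (b + c) = a + b + c := by omega
    have e2 : a + (b + (c+1)) = a + b + c + 1 := by omega
    rw [e1, e2] at hfact
    exact hfact hc'
  have G1 : v ≤ n - 1 := downTo_le nums (n-1)
  have G2 : ∀ k, v ≤ k → k < n - 1 → nums[k]! < nums[k+1]! := downTo_up nums (n-1)
  have G3 : 0 < v → ¬ nums[v-1]! < nums[v]! := downTo_stop nums (n-1)
  by_cases hR : 1 ≤ a ∧ 1 ≤ b ∧ 1 ≤ c ∧ c + 1 = l2.length
  · rw [decide_eq_true hR]
    obtain ⟨h1a, h1b, h1c, h1len⟩ := hR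
    have hne : nums ≠ [] := by
      intro e
      rw [e] at ha
      simp [upLen] at ha
      omega
    have han : a < n := halt hne
    have habc : a + b + c = n - 1 := by omega
    have hbl1 : b + 1 ≤ l1.length := by omega
    -- v = a + b
    have hvab : v = a + b := by
      by_contra hne'
      rcases Nat.lt_or_ge v (a+b) with hlt | hge
      · have hstep := G2 (a+b-1) (by omega) (by omega)
        have e3 : a + b - 1 + 1 = a + b := by omega
        rw [e3] at hstep
        have hstep2 := F3 (b-1) (by omega)
        have e1 : a + (b-1) + 1 = a + b := by omega
        have e2 : a + (b-1) = a + b - 1 := by omega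
        rw [e1, e2] at hstep2
        omega
      · have hgt : a + b < v := by omega
        have h0v : 0 < v := by omega
        have hstop := G3 h0v
        have hstep := F6 (v-1-(a+b)) (by omega)
        have e1 : a + b + (v-1-(a+b)) = v - 1 := by omega
        have e2 : a + b + (v-1-(a+b)) + 1 = v := by omega
        rw [e2, e1] at hstep
        exact hstop hstep
    rw [if_pos (by omega : a < v ∧ a ≠ 0 ∧ v ≠ n - 1)]
    rw [strictDec_iff]
    intro k h1 h2
    have hstep := F3 (k-a) (by omega)
    have e1 : a + (k-a) + 1 = k + 1 := by omega
    have e2 : a + (k-a) = k := by omega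
    rw [e1, e2] at hstep
    omega
  · rw [decide_eq_false hR]
    split
    · rename_i hcnd
      obtain ⟨hav, ha0, hvn⟩ := hcnd
      by_contra hsd
      have hsd' : strictDec nums a v = true := by
        cases hsdv : strictDec nums a v
        · exact absurd hsdv hsd
        · rfl
      have sd := (strictDec_iff nums v a).mp hsd'
      have hne : nums ≠ [] := by
        intro e
        have : n = 0 := by rw [hn, e]; rfl
        omega
      have han : a < n := halt hne
      have h1a : 1 ≤ a := by omega
      have hvn2 : v ≤ n - 2 := by omega
      have hn2 : 2 ≤ n := by omega
      -- b = v - a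
      have hbva : b = v - a := by
        rcases Nat.lt_trichotomy b (v - a) with hlt | heq | hgt
        · exfalso
          have hstep := sd (a+b) (by omega) (by omega)
          exact F4 (by omega) (by omega)
        · exact heq
        · exfalso
          have hstep := F3 (v-a) (by omega)
          have e1 : a + (v-a) + 1 = v + 1 := by omega
          have e2 : a + (v-a) = v := by omega
          rw [e1, e2] at hstep
          have hstep2 := G2 v le_rfl (by omega)
          omega
      -- c = n - 1 - v
      have hl2ne : l2 ≠ [] := by
        intro e
        rw [e] at hl2len
        simp at hl2len
        omega
      have hcl : c < l2.length := upLen_lt l2 hl2ne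
      have hcnv : c = n - 1 - v := by
        rcases Nat.lt_trichotomy c (n - 1 - v) with hlt | heq | hgt
        · exfalso
          have hstep := G2 (v+c) (by omega) (by omega)
          have e1 : a + b + c = v + c := by omega
          refine F7 (by omega) ?_
          rw [e1]
          exact hstep
        · exact heq
        · exfalso
          omega
      exact hR ⟨h1a, by omega, by omega, by omega⟩
    · rfl
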